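-- pv_equiv track=rewrite | github.com/jhutchinsbelgrave-zz/PennLabsChallenge | fun.py | question_mark
-- ===== SOURCE A (Python) =====
-- def question_mark(s):
--   curr_digit = 0
--   equal_10 = False
--   num_q_marks = 0
--   for character in s:
--     if character.isdigit():
--       if int(character) + curr_digit == 10:
--         if num_q_marks != 3:
--           return False
--         equal_10 = True
--       curr_digit = int(character)
--       num_q_marks = 0
--     elif character == '?':
--       num_q_marks += 1
--   if(equal_10):
--       return True
--   else:
--       return False
-- ===== SOURCE B (Python) =====
-- def question_mark(s):
--     # Index-based, declarative formulation: positions of all digits, then the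
--     # '?'-counts of every 10-sum pair via substring counting, then exists/forall.
--     digs = [(i, int(ch)) for i, ch in enumerate(s) if ch.isdigit()]
--     tens = [s.count('?', i + 1, j) for (i, a), (j, b) in zip(digs, digs[1:]) if a + b == 10]
--     return bool(tens) and all(q == 3 for q in tens)
-- ===== Notes on version B (the rewrite author's own statement) =====
-- stated objective: alternative
-- what changed: B replaces A's single stateful early-return character loop by an index-based declarative formulation: collect the positions and values of all digits via enumerate, compute the question-mark count between every consecutive 10-sum digit pair by substring counting with str.count over the index range, and return the order-independent predicate bool(tens) and all(q == 3) instead of short-circuiting.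
import Mathlib
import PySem

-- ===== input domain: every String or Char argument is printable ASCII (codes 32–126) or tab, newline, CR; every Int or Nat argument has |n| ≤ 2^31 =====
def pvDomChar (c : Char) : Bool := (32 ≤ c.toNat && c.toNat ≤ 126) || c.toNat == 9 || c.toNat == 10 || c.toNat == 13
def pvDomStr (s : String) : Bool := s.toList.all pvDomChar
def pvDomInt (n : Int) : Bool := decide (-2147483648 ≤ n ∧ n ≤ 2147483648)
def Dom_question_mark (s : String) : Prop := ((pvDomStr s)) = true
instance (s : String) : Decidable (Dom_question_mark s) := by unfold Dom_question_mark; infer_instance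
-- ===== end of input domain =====

-- B replaces A's stateful early-return character loop by an index-based declarative
-- formulation (digit positions + substring '?'-counts + exists/forall); objective: alternative.

-- ===== PORT A =====
-- A's for-loop with early return, state (curr_digit, equal_10, num_q_marks).
-- int(character) under the isdigit guard is exactly the digit value (c.toNat - 48) on ASCII.
def qmLoopA : List Char → Int → Bool → Int → Bool
  | [], _, eq10, _ => eq10
  | c :: rest, curr, eq10, nq =>
    if PySem.Chars.isdigit c then
      if ((c.toNat : Int) - 48) + curr = 10 then
        if nq ≠ 3 then false
        else qmLoopA rest ((c.toNat : Int) - 48) true 0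
      else qmLoopA rest ((c.toNat : Int) - 48) eq10 0
    else if c = '?' then qmLoopA rest curr eq10 (nq + 1)
    else qmLoopA rest curr eq10 nq

def question_mark (s : String) : Bool := qmLoopA s.toList 0 false 0

-- ===== PORT B =====
-- int(ch) for a single digit char (exact on ASCII digits)
def qmVal (c : Char) : Int := (c.toNat : Int) - 48
-- enumerate(s)
def qmEnum : Nat → List Char → List (Nat × Char)
  | _, [] => []
  | k, c :: rest => (k, c) :: qmEnum (k + 1) rest
-- s.count('?', a, b): occurrences of '?' in s[a:b]; exact for 0 ≤ a ≤ b (the only calls B makes)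
def qmCount (full : List Char) (a b : Nat) : Int := (((full.drop a).take (b - a)).count '?' : Int)
-- body of the first comprehension: keep (i, int(ch)) when ch.isdigit()
def qmDigF (p : Nat × Char) : Option (Nat × Int) :=
  if PySem.Chars.isdigit p.2 then some (p.1, qmVal p.2) else none
-- body of the second comprehension: keep s.count('?', i+1, j) when a + b == 10
def qmPairF (full : List Char) (p : (Nat × Int) × (Nat × Int)) : Option Int :=
  if p.1.2 + p.2.2 = 10 then some (qmCount full (p.1.1 + 1) p.2.1) else none

def question_mark_alt (s : String) : Bool :=
  let digs := (qmEnum 0 s.toList).filterMap qmDigF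
  let tens := (digs.zip digs.tail).filterMap (qmPairF s.toList)
  !tens.isEmpty && tens.all (fun q => q == 3)

-- ===== PRECONDITION & SPEC =====
def Spec_question_mark (s : String) (out : Bool) : Prop := out = question_mark_alt s
instance (s : String) (out : Bool) : Decidable (Spec_question_mark s out) := by unfold Spec_question_mark; infer_instance

-- ===== CLAIM (what is proved, stated in full; the proofs are below) =====
def Claim_equal_question_mark : Prop := ∀ (s : String), Dom_question_mark s → Spec_question_mark s (question_mark s)

-- ===== LEMMAS AND PROOFS =====

-- reference: the list of '?'-gap counts of the 10-sum pairs, in order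
def refGaps : List Char → Int → Int → List Int
  | [], _, _ => []
  | c :: rest, prev, q =>
    if PySem.Chars.isdigit c then
      (if prev + qmVal c = 10 then [q] else []) ++ refGaps rest (qmVal c) 0
    else if c = '?' then refGaps rest prev (q + 1)
    else refGaps rest prev q

theorem qmVal_bound (c : Char) (h : PySem.Chars.isdigit c = true) : 0 ≤ qmVal c ∧ qmVal c ≤ 9 := by
  have : '0' ≤ c ∧ c ≤ '9' := by simpa [PySem.Chars.isdigit, Char.le_def] using h
  have h1 : 48 ≤ c.toNat := this.1
  have h2 : c.toNat ≤ 57 := this.2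
  unfold qmVal; constructor <;> omega

-- A's loop returns (eq10 ∨ some 10-sum pair exists) ∧ (every 10-sum gap is 3)
theorem qmLoopA_eq_refGaps (cs : List Char) :
    ∀ (curr : Int) (eq10 : Bool) (nq : Int),
      qmLoopA cs curr eq10 nq =
        ((eq10 || !(refGaps cs curr nq).isEmpty) && (refGaps cs curr nq).all (fun q => q == 3)) := by
  induction cs with
  | nil => intro curr eq10 nq; cases eq10 <;> rfl
  | cons c rest ih =>
    intro curr eq10 nq
    by_cases hd : PySem.Chars.isdigit c
    · simp only [qmLoopA, refGaps, hd, if_pos, qmVal]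
      by_cases h10 : ((c.toNat : Int) - 48) + curr = 10
      · have h10' : curr + ((c.toNat : Int) - 48) = 10 := by omega
        simp only [h10, h10', if_pos]
        by_cases h3 : nq = 3
        · subst h3; simp [ih]
        · simp [h3]
      · have h10' : ¬ curr + ((c.toNat : Int) - 48) = 10 := by omega
        simp [h10, h10', ih]
    · by_cases hq : c = '?'
      · subst hq
        have h : PySem.Chars.isdigit '?' = false := by decide
        simp [qmLoopA, refGaps, h, ih]
      · simp [qmLoopA, refGaps, hd, hq, ih]

-- the list of digits (position, value) of the suffix starting at index k
def qmDk (k : Nat) (cs : List Char) : List (Nat × Int) := (qmEnum k cs).filterMap qmDigF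

def qmPairTens (full : List Char) (l : List (Nat × Int)) : List Int :=
  (l.zip l.tail).filterMap (qmPairF full)

theorem drop_step (full : List Char) (k : Nat) (c : Char) (rest : List Char)
    (h : full.drop k = c :: rest) : full.drop (k + 1) = rest := by
  rw [← List.tail_drop, h]; rfl

theorem getElem?_at (full : List Char) (k : Nat) (c : Char) (rest : List Char)
    (h : full.drop k = c :: rest) : full[k]? = some c := by
  have : (full.drop k)[0]? = some c := by rw [h]; rfl
  simpa using this

theorem qmCount_step (full : List Char) (a k : Nat) (c : Char) (rest : List Char)
    (h : full.drop k = c :: rest) (hak : a ≤ k) :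
    qmCount full a (k + 1) = qmCount full a k + (if c = '?' then 1 else 0) := by
  unfold qmCount
  have h1 : k + 1 - a = (k - a) + 1 := by omega
  rw [h1, List.take_add_one]
  have h2 : (full.drop a)[k - a]? = some c := by
    rw [List.getElem?_drop]
    have : a + (k - a) = k := by omega
    rw [this]; exact getElem?_at full k c rest h
  rw [h2, List.count_append]
  by_cases hc : c = '?'
  · subst hc; simp
  · simp [hc]

theorem qmCount_refl (full : List Char) (a : Nat) : qmCount full a a = 0 := by
  unfold qmCount; simp

theorem qmPairTens_cons (full : List Char) :
    ∀ (cs : List Char) (k i : Nat) (d q : Int),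
      full.drop k = cs → i + 1 ≤ k → qmCount full (i + 1) k = q →
      qmPairTens full ((i, d) :: qmDk k cs) = refGaps cs d q := by
  intro cs
  induction cs with
  | nil =>
    intro k i d q hdrop hik hq
    simp [qmDk, qmEnum, qmPairTens, refGaps]
  | cons c rest ih =>
    intro k i d q hdrop hik hq
    have hrest : full.drop (k + 1) = rest := drop_step full k c rest hdrop
    by_cases hd : PySem.Chars.isdigit c
    · have hDk : qmDk k (c :: rest) = (k, qmVal c) :: qmDk (k + 1) rest := by
        simp [qmDk, qmEnum, qmDigF, hd]
      have htail := ih (k + 1) k (qmVal c) 0 hrest (by omega) (qmCount_refl full (k + 1))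
      rw [hDk]
      simp only [qmPairTens, List.zip_cons_cons, List.tail_cons, List.filterMap_cons] at htail ⊢
      rw [htail]
      simp only [qmPairF, refGaps, hd, if_pos, hq]
      by_cases h10 : d + qmVal c = 10
      · simp [h10]
      · simp [h10]
    · have hDk : qmDk k (c :: rest) = qmDk (k + 1) rest := by
        simp [qmDk, qmEnum, qmDigF, hd]
      rw [hDk]
      by_cases hqm : c = '?'
      · subst hqm
        have := qmCount_step full (i + 1) k '?' rest hdrop (by omega)
        simp at this
        have hdd : PySem.Chars.isdigit '?' = false := by decide
        rw [ih (k + 1) i d (q + 1) hrest (by omega) (by rw [this, hq])]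
        simp [refGaps, hdd]
      · have := qmCount_step full (i + 1) k c rest hdrop (by omega)
        simp [hqm] at this
        rw [ih (k + 1) i d q hrest (by omega) (by rw [this, hq])]
        simp [refGaps, hd, hqm]

theorem qmPairTens_top (full : List Char) :
    ∀ (cs : List Char) (k : Nat) (q : Int),
      full.drop k = cs → qmPairTens full (qmDk k cs) = refGaps cs 0 q := by
  intro cs
  induction cs with
  | nil => intro k q _; simp [qmDk, qmEnum, qmPairTens, refGaps]
  | cons c rest ih =>
    intro k q hdrop
    have hrest : full.drop (k + 1) = rest := drop_step full k c rest hdrop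
    by_cases hd : PySem.Chars.isdigit c
    · have hDk : qmDk k (c :: rest) = (k, qmVal c) :: qmDk (k + 1) rest := by
        simp [qmDk, qmEnum, qmDigF, hd]
      rw [hDk, qmPairTens_cons full rest (k + 1) k (qmVal c) 0 hrest (by omega) (qmCount_refl full (k + 1))]
      have hv := qmVal_bound c hd
      have h10b : ¬ qmVal c = 10 := by omega
      simp [refGaps, hd, h10b]
    · have hDk : qmDk k (c :: rest) = qmDk (k + 1) rest := by
        simp [qmDk, qmEnum, qmDigF, hd]
      by_cases hqm : c = '?'
      · subst hqm
        have hdd : PySem.Chars.isdigit '?' = false := by decide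
        rw [hDk, ih (k + 1) (q + 1) hrest]
        simp [refGaps, hdd]
      · rw [hDk, ih (k + 1) q hrest]
        simp [refGaps, hd, hqm]

-- ===== VERDICT (by name: the statement is the Claim_ definition above) =====
theorem question_mark_spec : Claim_equal_question_mark := by
  intro s _
  unfold Spec_question_mark question_mark question_mark_alt
  rw [qmLoopA_eq_refGaps]
  have := qmPairTens_top s.toList s.toList 0 0 (by rfl)
  unfold qmPairTens qmDk at this
  rw [← this]
  simp
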